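-- pv_equiv track=rewrite | github.com/RoundSann/RoundSann.github.io | source/_posts/Games/苍色之光与魔剑锻造师/衰减计算器.py | calc_power_magic_decay
-- ===== SOURCE A (Python) =====
-- import math
--
-- def js_round(x):
--     """JS Math.round: 0.5 向上取整"""
--     return math.floor(x + 0.5)
--
-- def calc_power_magic_decay(value, plus_mode=False):
--     """韧性/魔力 7 段分段衰减。最终 +1（碎片模板自带 1）。"""
--     if plus_mode:
--         value *= 2
--     result = 0
--     count = 0
--     segments = [(70, 40), (55, 25), (42, 19), (30, 14), (20, 10), (10, 7), (0, 5)]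
--     remainder_div = [(70, 50), (55, 30), (42, 20), (30, 15), (20, 12), (10, 8), (0, 5)]
--     for _ in range(value + 1):
--         count += 1
--         for threshold, step in segments:
--             if result >= threshold:
--                 if count >= step:
--                     result += 1; count = 0
--                 break
--     for threshold, divisor in remainder_div:
--         if result >= threshold:
--             result += js_round(count / divisor)
--             break
--     return result + 1
-- ===== SOURCE B (Python) =====
-- def calc_power_magic_decay(value, plus_mode=False):
--     """Closed-form band-by-band computation: O(1) instead of O(value) ticks."""
--     if plus_mode:
--         value *= 2
--     t = value + 1
--     if t < 0:
--         t = 0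
--     result = 0
--     for step, width in [(5, 10), (7, 10), (10, 10), (14, 12), (19, 13), (25, 15)]:
--         inc = min(width, t // step)
--         result += inc
--         t -= inc * step
--         if inc < width:
--             break
--     else:
--         inc = t // 40
--         result += inc
--         t -= inc * 40
--     for threshold, divisor in [(70, 50), (55, 30), (42, 20), (30, 15), (20, 12), (10, 8), (0, 5)]:
--         if result >= threshold:
--             if 2 * t >= divisor:
--                 result += 1
--             break
--     return result + 1
-- ===== Notes on version B (the rewrite author's own statement) =====
-- stated objective: faster
-- what changed: Replaces the O(value) tick-by-tick simulation with an O(1) band-by-band closed form: for each of the 7 decay bands it computes the number of increments and consumed ticks by integer division, carrying the leftover tick count.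
import Mathlib
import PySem

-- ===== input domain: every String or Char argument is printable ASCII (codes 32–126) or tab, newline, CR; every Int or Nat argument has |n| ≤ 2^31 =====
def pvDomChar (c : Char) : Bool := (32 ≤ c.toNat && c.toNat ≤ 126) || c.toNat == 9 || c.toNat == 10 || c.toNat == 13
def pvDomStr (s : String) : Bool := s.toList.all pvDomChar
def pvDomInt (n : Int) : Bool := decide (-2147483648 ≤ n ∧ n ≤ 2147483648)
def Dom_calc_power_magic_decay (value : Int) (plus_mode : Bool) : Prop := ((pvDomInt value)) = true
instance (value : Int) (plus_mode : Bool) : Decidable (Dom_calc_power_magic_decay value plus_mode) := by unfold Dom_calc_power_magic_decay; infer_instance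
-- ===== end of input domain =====

-- B replaces A's O(value) tick-by-tick simulation with an O(1) band-by-band closed form (objective: faster, asymptotic).

-- ===== PORT A =====
def pvSegs : List (Int × Int) := [(70, 40), (55, 25), (42, 19), (30, 14), (20, 10), (10, 7), (0, 5)]
def pvRemDiv : List (Int × Int) := [(70, 50), (55, 30), (42, 20), (30, 15), (20, 12), (10, 8), (0, 5)]

-- inner 'for threshold, step in segments: if result >= threshold: …; break'
def pvInnerA : List (Int × Int) → Int → Int → Int × Int
  | [], r, c => (r, c)
  | (t, s) :: rest, r, c => if r ≥ t then (if c ≥ s then (r + 1, 0) else (r, c)) else pvInnerA rest r c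

-- 'for _ in range(value + 1)' : (value+1).toNat iterations over state (result, count)
def pvLoopA : Nat → Int → Int → Int × Int
  | 0, r, c => (r, c)
  | n + 1, r, c =>
      let p := pvInnerA pvSegs r (c + 1)
      pvLoopA n p.1 p.2

-- final 'for threshold, divisor in remainder_div: …; break'.
-- js_round(count / divisor) is ported exactly as floor((2*count+divisor)/(2*divisor)):
-- for the reachable arguments 0 ≤ count ≤ 39 and divisor ∈ {5,8,12,15,20,30,50} the float
-- computation math.floor(count/divisor + 0.5) returns exactly this integer.
def pvRemA : List (Int × Int) → Int → Int → Int
  | [], r, _ => r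
  | (t, d) :: rest, r, c =>
      if r ≥ t then r + PySem.Int.floordiv (2 * c + d) (2 * d) else pvRemA rest r c

def calc_power_magic_decay (value : Int) (plus_mode : Bool) : Int :=
  let v := if plus_mode then value * 2 else value
  let p := pvLoopA (v + 1).toNat 0 0
  pvRemA pvRemDiv p.1 p.2 + 1

-- ===== PORT B =====
def pvBands : List (Int × Int) := [(5, 10), (7, 10), (10, 10), (14, 12), (19, 13), (25, 15)]

-- B's for/else over the six bounded bands, then the unbounded top band (step 40)
def pvRemDivB : List (Int × Int) := [(70, 50), (55, 30), (42, 20), (30, 15), (20, 12), (10, 8), (0, 5)]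

def pvLoopB : List (Int × Int) → Int → Int → Int × Int
  | [], r, t =>
      let inc := PySem.Int.floordiv t 40
      (r + inc, t - inc * 40)
  | (s, w) :: rest, r, t =>
      let inc := min w (PySem.Int.floordiv t s)
      if inc < w then (r + inc, t - inc * s) else pvLoopB rest (r + inc) (t - inc * s)

def pvRemB : List (Int × Int) → Int → Int → Int
  | [], r, _ => r
  | (t, d) :: rest, r, c =>
      if r ≥ t then (if 2 * c ≥ d then r + 1 else r) else pvRemB rest r c

def calc_power_magic_decay_alt (value : Int) (plus_mode : Bool) : Int :=
  let v := if plus_mode then value * 2 else value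
  let t0 := v + 1
  let t := if t0 < 0 then 0 else t0
  let p := pvLoopB pvBands 0 t
  pvRemB pvRemDivB p.1 p.2 + 1

-- ===== PRECONDITION & SPEC =====
def Spec_calc_power_magic_decay (value : Int) (plus_mode : Bool) (out : Int) : Prop := out = calc_power_magic_decay_alt value plus_mode
instance (value : Int) (plus_mode : Bool) (out : Int) : Decidable (Spec_calc_power_magic_decay value plus_mode out) := by unfold Spec_calc_power_magic_decay; infer_instance

-- ===== CLAIM (what is proved, stated in full; the proofs are below) =====
def Claim_equal_calc_power_magic_decay : Prop := ∀ (value : Int) (plus_mode : Bool), Dom_calc_power_magic_decay value plus_mode → Spec_calc_power_magic_decay value plus_mode (calc_power_magic_decay value plus_mode)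

-- ===== LEMMAS AND PROOFS =====

-- In a bounded band [lo, hi) with step s, A's loop is arithmetic until it leaves the band.
theorem pv_bandA (lo hi s : Int) (hs : 0 < s)
    (hstep : ∀ r c, lo ≤ r → r < hi → pvInnerA pvSegs r c = if s ≤ c then (r + 1, 0) else (r, c)) :
    ∀ (n : Nat) (r c : Int), lo ≤ r → r < hi → 0 ≤ c → c < s →
      pvLoopA n r c =
        if (n : Int) + c < s * (hi - r) then (r + (c + n) / s, (c + n) % s)
        else pvLoopA (n - (s * (hi - r) - c).toNat) hi 0 := by
  intro n
  induction n with
  | zero =>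
    intro r c hlo hhi hc0 hcs
    have h1 : s * 1 ≤ s * (hi - r) := by
      apply mul_le_mul_of_nonneg_left _ (le_of_lt hs); omega
    have hcond : ((0 : Nat) : Int) + c < s * (hi - r) := by push_cast; omega
    rw [if_pos hcond]
    show (r, c) = _
    simp [Int.ediv_eq_zero_of_lt hc0 hcs, Int.emod_eq_of_lt hc0 hcs]
  | succ n ih =>
    intro r c hlo hhi hc0 hcs
    have hXr : s * (hi - r) = s * (hi - r - 1) + s := by ring
    have hX0 : 0 ≤ s * (hi - r - 1) := by
      apply mul_nonneg (le_of_lt hs); omega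
    show pvLoopA (n + 1) r c = _
    rw [pvLoopA, hstep r (c + 1) hlo hhi]
    by_cases hinc : s ≤ c + 1
    · -- c = s - 1 : an increment happens
      have hc : c = s - 1 := by omega
      rw [if_pos hinc]
      by_cases hhi2 : r + 1 < hi
      · have := ih (r + 1) 0 (by omega) hhi2 (le_refl 0) hs
        simp only [add_zero, zero_add] at this
        have hXr2 : s * (hi - (r + 1)) = s * (hi - r - 1) := by ring_nf
        rw [this, hXr2]
        by_cases hcond : ((n + 1 : Nat) : Int) + c < s * (hi - r)
        · have hcond2 : (n : Int) < s * (hi - r - 1) := by push_cast at hcond ⊢; omega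
          rw [if_pos hcond2, if_pos hcond]
          have hdiv : (c + ((n : Int) + 1)) = (n : Int) + s * 1 := by omega
          push_cast
          rw [show c + ((n : Int) + 1) = (n : Int) + s * 1 by omega]
          rw [Int.add_mul_ediv_left _ _ (by omega : s ≠ 0), Int.add_mul_emod_self_left]
          simp only [Prod.mk.injEq]
          exact ⟨by ring, trivial⟩
        · have hcond2 : ¬ ((n : Int) < s * (hi - r - 1)) := by push_cast at hcond ⊢; omega
          rw [if_neg hcond2, if_neg hcond]
          congr 1
          push_cast at hcond
          omega
      · -- r + 1 = hi : band exhausted exactly now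
        have hhiEq : hi = r + 1 := by omega
        have hcond : ¬ (((n + 1 : Nat) : Int) + c < s * (hi - r)) := by
          rw [hhiEq]; push_cast; omega
        rw [if_neg hcond]
        have harg : (n + 1) - (s * (hi - r) - c).toNat = n := by
          rw [hhiEq]; simp; omega
        rw [harg, hhiEq]
    · -- no increment, counter grows
      rw [if_neg hinc]
      have := ih r (c + 1) hlo hhi (by omega) (by omega)
      rw [this]
      by_cases hcond : ((n + 1 : Nat) : Int) + c < s * (hi - r)
      · have hcond2 : (n : Int) + (c + 1) < s * (hi - r) := by push_cast at hcond ⊢; omega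
        rw [if_pos hcond2, if_pos hcond]
        push_cast
        rw [show c + 1 + (n : Int) = c + ((n : Int) + 1) by ring]
      · have hcond2 : ¬ ((n : Int) + (c + 1) < s * (hi - r)) := by push_cast at hcond ⊢; omega
        rw [if_neg hcond2, if_neg hcond]
        congr 1
        push_cast at hcond
        omega

-- In the unbounded top band (result ≥ 70, step 40) the loop is pure arithmetic.
theorem pv_topA : ∀ (n : Nat) (r c : Int), 70 ≤ r → 0 ≤ c → c < 40 →
    pvLoopA n r c = (r + (c + n) / 40, (c + n) % 40) := by
  intro n
  induction n with
  | zero =>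
    intro r c h70 hc0 hcs
    show (r, c) = _
    simp only [Nat.cast_zero, add_zero, Prod.mk.injEq]
    omega
  | succ n ih =>
    intro r c h70 hc0 hcs
    show pvLoopA (n + 1) r c = _
    have hinner : pvInnerA pvSegs r (c + 1) = if (c + 1) ≥ 40 then (r + 1, 0) else (r, c + 1) := by
      simp only [pvSegs, pvInnerA]
      rw [if_pos (by omega : r ≥ 70)]
    rw [pvLoopA, hinner]
    by_cases h40 : (c + 1) ≥ 40
    · rw [if_pos h40]
      have := ih (r + 1) 0 (by omega) (le_refl 0) (by omega)
      simp only [zero_add] at this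
      rw [this]
      simp only [Prod.mk.injEq]
      push_cast
      omega
    · rw [if_neg h40]
      have := ih r (c + 1) h70 (by omega) (by omega)
      rw [this]
      simp only [Prod.mk.injEq]
      push_cast
      omega

-- pvInnerA step characterisations for the six bounded bands
theorem pv_step0 : ∀ r c, (0:Int) ≤ r → r < 10 → pvInnerA pvSegs r c = if (5:Int) ≤ c then (r + 1, 0) else (r, c) := by
  intro r c h1 h2; simp [pvInnerA, pvSegs, ge_iff_le]
  split_ifs <;> first | rfl | omega
theorem pv_step1 : ∀ r c, (10:Int) ≤ r → r < 20 → pvInnerA pvSegs r c = if (7:Int) ≤ c then (r + 1, 0) else (r, c) := by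
  intro r c h1 h2; simp [pvInnerA, pvSegs, ge_iff_le]
  split_ifs <;> first | rfl | omega
theorem pv_step2 : ∀ r c, (20:Int) ≤ r → r < 30 → pvInnerA pvSegs r c = if (10:Int) ≤ c then (r + 1, 0) else (r, c) := by
  intro r c h1 h2; simp [pvInnerA, pvSegs, ge_iff_le]
  split_ifs <;> first | rfl | omega
theorem pv_step3 : ∀ r c, (30:Int) ≤ r → r < 42 → pvInnerA pvSegs r c = if (14:Int) ≤ c then (r + 1, 0) else (r, c) := by
  intro r c h1 h2; simp [pvInnerA, pvSegs, ge_iff_le]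
  split_ifs <;> first | rfl | omega
theorem pv_step4 : ∀ r c, (42:Int) ≤ r → r < 55 → pvInnerA pvSegs r c = if (19:Int) ≤ c then (r + 1, 0) else (r, c) := by
  intro r c h1 h2; simp [pvInnerA, pvSegs, ge_iff_le]
  split_ifs <;> first | rfl | omega
theorem pv_step5 : ∀ r c, (55:Int) ≤ r → r < 70 → pvInnerA pvSegs r c = if (25:Int) ≤ c then (r + 1, 0) else (r, c) := by
  intro r c h1 h2; simp [pvInnerA, pvSegs, ge_iff_le]
  split_ifs <;> first | rfl | omega

-- specialised instances of the band lemma, with the constants evaluated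
theorem pv_b0 : ∀ n : Nat, pvLoopA n 0 0 = if (n : Int) < 50 then ((n : Int) / 5, (n : Int) % 5) else pvLoopA (n - 50) 10 0 := by
  intro n
  rw [pv_bandA 0 10 5 (by norm_num) pv_step0 n 0 0 le_rfl (by norm_num) le_rfl (by norm_num)]
  norm_num
  simp

theorem pv_b1 : ∀ n : Nat, pvLoopA n 10 0 = if (n : Int) < 70 then (10 + (n : Int) / 7, (n : Int) % 7) else pvLoopA (n - 70) 20 0 := by
  intro n
  rw [pv_bandA 10 20 7 (by norm_num) pv_step1 n 10 0 le_rfl (by norm_num) le_rfl (by norm_num)]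
  norm_num
  simp

theorem pv_b2 : ∀ n : Nat, pvLoopA n 20 0 = if (n : Int) < 100 then (20 + (n : Int) / 10, (n : Int) % 10) else pvLoopA (n - 100) 30 0 := by
  intro n
  rw [pv_bandA 20 30 10 (by norm_num) pv_step2 n 20 0 le_rfl (by norm_num) le_rfl (by norm_num)]
  norm_num
  simp

theorem pv_b3 : ∀ n : Nat, pvLoopA n 30 0 = if (n : Int) < 168 then (30 + (n : Int) / 14, (n : Int) % 14) else pvLoopA (n - 168) 42 0 := by
  intro n
  rw [pv_bandA 30 42 14 (by norm_num) pv_step3 n 30 0 le_rfl (by norm_num) le_rfl (by norm_num)]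
  norm_num
  simp

theorem pv_b4 : ∀ n : Nat, pvLoopA n 42 0 = if (n : Int) < 247 then (42 + (n : Int) / 19, (n : Int) % 19) else pvLoopA (n - 247) 55 0 := by
  intro n
  rw [pv_bandA 42 55 19 (by norm_num) pv_step4 n 42 0 le_rfl (by norm_num) le_rfl (by norm_num)]
  norm_num
  simp

theorem pv_b5 : ∀ n : Nat, pvLoopA n 55 0 = if (n : Int) < 375 then (55 + (n : Int) / 25, (n : Int) % 25) else pvLoopA (n - 375) 70 0 := by
  intro n
  rw [pv_bandA 55 70 25 (by norm_num) pv_step5 n 55 0 le_rfl (by norm_num) le_rfl (by norm_num)]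
  norm_num
  simp

theorem pv_btop : ∀ n : Nat, pvLoopA n 70 0 = (70 + (n : Int) / 40, (n : Int) % 40) := by
  intro n
  rw [pv_topA n 70 0 le_rfl le_rfl (by norm_num)]
  norm_num

-- one bounded band of B's loop, in closed form
theorem pv_stepB (s w : Int) (rest : List (Int × Int)) (r t : Int) (hs : 0 < s) (ht : 0 ≤ t) :
    pvLoopB ((s, w) :: rest) r t =
      if t < w * s then (r + t / s, t % s) else pvLoopB rest (r + w) (t - w * s) := by
  simp only [pvLoopB]
  rw [PySem.Int.floordiv_eq_ediv_of_pos hs]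
  by_cases h : t < w * s
  · have hlt : t / s < w := by rw [Int.ediv_lt_iff_lt_mul hs]; exact h
    rw [min_eq_right hlt.le, if_pos hlt, if_pos h]
    have hm : t - t / s * s = t % s := by rw [Int.emod_def]; ring
    rw [hm]
  · have hge : w ≤ t / s := by rw [Int.le_ediv_iff_mul_le hs]; omega
    rw [min_eq_left hge, if_neg (lt_irrefl w), if_neg h]

-- the unbounded top band of B's loop
theorem pv_lastB (r t : Int) (ht : 0 ≤ t) :
    pvLoopB [] r t = (r + t / 40, t % 40) := by
  simp only [pvLoopB]
  rw [PySem.Int.floordiv_eq_ediv_of_pos (by norm_num : (0:Int) < 40)]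
  have hm : t - t / 40 * 40 = t % 40 := by rw [Int.emod_def]; ring
  rw [hm]

-- B's loop evaluated to a closed piecewise form
theorem pv_B_eval (t : Int) (ht : 0 ≤ t) :
    pvLoopB pvBands 0 t =
      if t < 50 then (t / 5, t % 5)
      else if t < 120 then (10 + (t - 50) / 7, (t - 50) % 7)
      else if t < 220 then (20 + (t - 120) / 10, (t - 120) % 10)
      else if t < 388 then (30 + (t - 220) / 14, (t - 220) % 14)
      else if t < 635 then (42 + (t - 388) / 19, (t - 388) % 19)
      else if t < 1010 then (55 + (t - 635) / 25, (t - 635) % 25)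
      else (70 + (t - 1010) / 40, (t - 1010) % 40) := by
  show pvLoopB [(5, 10), (7, 10), (10, 10), (14, 12), (19, 13), (25, 15)] 0 t = _
  rcases lt_or_ge t 50 with h0 | h0
  · rw [pv_stepB _ _ _ _ _ (by norm_num) ht, if_pos (by omega), if_pos h0]
    norm_num
  · rw [pv_stepB _ _ _ _ _ (by norm_num) ht, if_neg (by omega), if_neg (by omega)]
    norm_num
    rcases lt_or_ge t 120 with h1 | h1
    · rw [pv_stepB _ _ _ _ _ (by norm_num) (by omega), if_pos (by omega), if_pos (by omega)]
    · rw [pv_stepB _ _ _ _ _ (by norm_num) (by omega), if_neg (by omega), if_neg (by omega)]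
      norm_num
      rcases lt_or_ge t 220 with h2 | h2
      · rw [pv_stepB _ _ _ _ _ (by norm_num) (by omega), if_pos (by omega), if_pos (by omega)]
        norm_num
        omega
      · rw [pv_stepB _ _ _ _ _ (by norm_num) (by omega), if_neg (by omega), if_neg (by omega)]
        norm_num
        rcases lt_or_ge t 388 with h3 | h3
        · rw [pv_stepB _ _ _ _ _ (by norm_num) (by omega), if_pos (by omega), if_pos (by omega)]
          norm_num
          omega
        · rw [pv_stepB _ _ _ _ _ (by norm_num) (by omega), if_neg (by omega), if_neg (by omega)]
          norm_num
          rcases lt_or_ge t 635 with h4 | h4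
          · rw [pv_stepB _ _ _ _ _ (by norm_num) (by omega), if_pos (by omega), if_pos (by omega)]
            norm_num
            omega
          · rw [pv_stepB _ _ _ _ _ (by norm_num) (by omega), if_neg (by omega), if_neg (by omega)]
            norm_num
            rcases lt_or_ge t 1010 with h5 | h5
            · rw [pv_stepB _ _ _ _ _ (by norm_num) (by omega), if_pos (by omega), if_pos (by omega)]
              norm_num
              omega
            · rw [pv_stepB _ _ _ _ _ (by norm_num) (by omega), if_neg (by omega), if_neg (by omega)]
              norm_num
              rw [pv_lastB _ _ (by omega)]
              norm_num
              omega

-- the two loops agree on every nonnegative tick budget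
theorem pv_loops_eq (t : Int) (ht : 0 ≤ t) : pvLoopA t.toNat 0 0 = pvLoopB pvBands 0 t := by
  rw [pv_B_eval t ht]
  rcases lt_or_ge t 50 with h0 | h0
  · rw [pv_b0, if_pos (by omega), if_pos h0]
    have e : ((t.toNat : Nat) : Int) = t := by omega
    rw [e]
  · rw [pv_b0, if_neg (by omega), show t.toNat - 50 = (t - 50).toNat by omega, if_neg (by omega)]
    rcases lt_or_ge t 120 with h1 | h1
    · rw [pv_b1, if_pos (by omega), if_pos (by omega)]
      rw [show (((t - 50).toNat : Nat) : Int) = t - 50 by omega]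
    · rw [pv_b1, if_neg (by omega), show (t - 50).toNat - 70 = (t - 120).toNat by omega, if_neg (by omega)]
      rcases lt_or_ge t 220 with h2 | h2
      · rw [pv_b2, if_pos (by omega), if_pos (by omega)]
        rw [show (((t - 120).toNat : Nat) : Int) = t - 120 by omega]
      · rw [pv_b2, if_neg (by omega), show (t - 120).toNat - 100 = (t - 220).toNat by omega, if_neg (by omega)]
        rcases lt_or_ge t 388 with h3 | h3
        · rw [pv_b3, if_pos (by omega), if_pos (by omega)]
          rw [show (((t - 220).toNat : Nat) : Int) = t - 220 by omega]
        · rw [pv_b3, if_neg (by omega), show (t - 220).toNat - 168 = (t - 388).toNat by omega, if_neg (by omega)]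
          rcases lt_or_ge t 635 with h4 | h4
          · rw [pv_b4, if_pos (by omega), if_pos (by omega)]
            rw [show (((t - 388).toNat : Nat) : Int) = t - 388 by omega]
          · rw [pv_b4, if_neg (by omega), show (t - 388).toNat - 247 = (t - 635).toNat by omega, if_neg (by omega)]
            rcases lt_or_ge t 1010 with h5 | h5
            · rw [pv_b5, if_pos (by omega), if_pos (by omega)]
              rw [show (((t - 635).toNat : Nat) : Int) = t - 635 by omega]
            · rw [pv_b5, if_neg (by omega), show (t - 635).toNat - 375 = (t - 1010).toNat by omega, if_neg (by omega)]
              rw [pv_btop]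
              rw [show (((t - 1010).toNat : Nat) : Int) = t - 1010 by omega]

-- the two remainder scans agree when the leftover count is below the matched divisor
theorem pv_rem_eq (r c : Int) (hc : 0 ≤ c)
    (hb : (70 ≤ r ∧ c < 50) ∨ (55 ≤ r ∧ r < 70 ∧ c < 30) ∨ (42 ≤ r ∧ r < 55 ∧ c < 20) ∨
          (30 ≤ r ∧ r < 42 ∧ c < 15) ∨ (20 ≤ r ∧ r < 30 ∧ c < 12) ∨ (10 ≤ r ∧ r < 20 ∧ c < 8) ∨
          (0 ≤ r ∧ r < 10 ∧ c < 5)) :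
    pvRemA pvRemDiv r c = pvRemB pvRemDivB r c := by
  simp only [pvRemA, pvRemB, pvRemDiv, pvRemDivB, ge_iff_le]
  split_ifs <;>
    first
      | omega
      | (rw [PySem.Int.floordiv_eq_ediv_of_pos (by norm_num)]; omega)

-- the loop state satisfies the band invariant needed by pv_rem_eq
theorem pv_inv (t : Int) (ht : 0 ≤ t) :
    let p := pvLoopB pvBands 0 t
    0 ≤ p.2 ∧
      ((70 ≤ p.1 ∧ p.2 < 50) ∨ (55 ≤ p.1 ∧ p.1 < 70 ∧ p.2 < 30) ∨ (42 ≤ p.1 ∧ p.1 < 55 ∧ p.2 < 20) ∨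
       (30 ≤ p.1 ∧ p.1 < 42 ∧ p.2 < 15) ∨ (20 ≤ p.1 ∧ p.1 < 30 ∧ p.2 < 12) ∨ (10 ≤ p.1 ∧ p.1 < 20 ∧ p.2 < 8) ∨
       (0 ≤ p.1 ∧ p.1 < 10 ∧ p.2 < 5)) := by
  rw [pv_B_eval t ht]
  split_ifs with h0 h1 h2 h3 h4 h5
  · exact ⟨by omega, Or.inr (Or.inr (Or.inr (Or.inr (Or.inr (Or.inr ⟨by omega, by omega, by omega⟩)))))⟩
  · exact ⟨by omega, Or.inr (Or.inr (Or.inr (Or.inr (Or.inr (Or.inl ⟨by omega, by omega, by omega⟩)))))⟩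
  · exact ⟨by omega, Or.inr (Or.inr (Or.inr (Or.inr (Or.inl ⟨by omega, by omega, by omega⟩))))⟩
  · exact ⟨by omega, Or.inr (Or.inr (Or.inr (Or.inl ⟨by omega, by omega, by omega⟩)))⟩
  · exact ⟨by omega, Or.inr (Or.inr (Or.inl ⟨by omega, by omega, by omega⟩))⟩
  · exact ⟨by omega, Or.inr (Or.inl ⟨by omega, by omega, by omega⟩)⟩
  · exact ⟨by omega, Or.inl ⟨by omega, by omega⟩⟩

-- ===== VERDICT (by name: the statement is the Claim_ definition above) =====
theorem calc_power_magic_decay_spec : Claim_equal_calc_power_magic_decay := by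
  intro value plus_mode _
  unfold Spec_calc_power_magic_decay calc_power_magic_decay calc_power_magic_decay_alt
  simp only []
  set v := if plus_mode then value * 2 else value with hv
  set t : Int := if v + 1 < 0 then 0 else v + 1 with htdef
  have ht : 0 ≤ t := by rw [htdef]; split_ifs <;> omega
  have htoNat : (v + 1).toNat = t.toNat := by rw [htdef]; split_ifs <;> omega
  rw [htoNat, pv_loops_eq t ht]
  have hinv := pv_inv t ht
  exact congrArg (· + 1) (pv_rem_eq _ _ hinv.1 hinv.2)
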